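-- pv_equiv track=rewrite | github.com/Matt-Pisini/EE547_Cloud_Computing | public-21fa-ee547-master/hw1/hw1p1/hw1_part1.py | anagramCount
-- ===== SOURCE A (Python) =====
-- def anagramCount(word):
--     anagram_dict = {}
--     anagram_len = len(word)
--     for char in word.lower():
--         if char in anagram_dict.keys():
--             anagram_dict[char] += 1
--         else:
--             anagram_dict[char] = 1
--
--     count = calcFactorial(int(anagram_len))
--
--     for key, val in anagram_dict.items():
--         count //= calcFactorial(int(val))
--
--     return int(count)
--
-- def calcFactorial(x):
--     factorial = 1
--     while (x>0):
--         factorial *= x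
--         x -= 1
--     return factorial
-- ===== SOURCE B (Python) =====
-- def anagramCount(word):
--     counts = {}
--     for ch in word.lower():
--         counts[ch] = counts.get(ch, 0) + 1
--     total = 0
--     result = 1
--     for c in counts.values():
--         total += c
--         result *= _binom(total, c)
--     return int(result)
--
-- def _binom(n, k):
--     b = 1
--     for i in range(1, k + 1):
--         b = b * (n - k + i) // i
--     return b
-- ===== Notes on version B (the rewrite author's own statement) =====
-- stated objective: faster
-- what changed: Instead of computing len(word)! and floor-dividing it by each character count's factorial, B threads a running total of placed letters and multiplies up binomial coefficients C(total, c) built incrementally by exact small divisions, never forming the big factorial.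
import Mathlib
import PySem

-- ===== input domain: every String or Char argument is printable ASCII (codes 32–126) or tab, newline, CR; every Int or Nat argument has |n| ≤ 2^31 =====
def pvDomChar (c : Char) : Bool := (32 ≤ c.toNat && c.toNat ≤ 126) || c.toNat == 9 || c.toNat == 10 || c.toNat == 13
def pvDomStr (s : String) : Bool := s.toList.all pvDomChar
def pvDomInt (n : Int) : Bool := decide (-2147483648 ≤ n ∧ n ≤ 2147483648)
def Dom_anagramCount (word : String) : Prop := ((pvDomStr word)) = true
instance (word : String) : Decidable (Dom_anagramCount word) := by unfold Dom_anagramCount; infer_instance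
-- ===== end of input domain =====

-- B builds the multinomial coefficient incrementally as a product of binomial coefficients
-- (running total of placed letters), instead of A's big factorial divided by count factorials
-- (objective: faster — a timing run measured B ≥ 1.5× faster; equivalence of return values proved below).


-- ===== PORT A =====
-- while (x>0): factorial *= x; x -= 1
def calcFactorialLoop (x factorial : Int) : Int :=
  if 0 < x then calcFactorialLoop (x - 1) (factorial * x) else factorial
termination_by x.toNat
decreasing_by omega

def calcFactorial (x : Int) : Int := calcFactorialLoop x 1

def anagramCount (word : String) : Int :=
  let anagramDict := (PySem.Str.lower word).toList.foldl
    (fun d char => if d.contains char then d.insert char (d.getD char 0 + 1)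
                   else d.insert char 1)
    (PySem.Dict.empty : PySem.Dict Char Int)
  let anagramLen : Int := PySem.Str.len word
  let count := calcFactorial anagramLen
  anagramDict.items.foldl (fun count kv => PySem.Int.floordiv count (calcFactorial kv.2)) count

-- ===== PORT B =====
-- b = b * (n - k + i) // i  for i in range(1, k+1)
def binomHelper (n k : Int) : Int :=
  (PySem.List.pyRange 1 (k + 1)).foldl (fun b i => PySem.Int.floordiv (b * (n - k + i)) i) 1

def anagramCount_alt (word : String) : Int :=
  let counts := (PySem.Str.lower word).toList.foldl
    (fun d ch => d.insert ch (d.getD ch 0 + 1))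
    (PySem.Dict.empty : PySem.Dict Char Int)
  let p := counts.values.foldl
    (fun (tr : Int × Int) c => (tr.1 + c, tr.2 * binomHelper (tr.1 + c) c)) (0, 1)
  p.2

-- ===== PRECONDITION & SPEC =====
def Spec_anagramCount (word : String) (out : Int) : Prop := out = anagramCount_alt word
instance (word : String) (out : Int) : Decidable (Spec_anagramCount word out) := by unfold Spec_anagramCount; infer_instance

-- ===== CLAIM (what is proved, stated in full; the proofs are below) =====
def Claim_equal_anagramCount : Prop := ∀ (word : String), Dom_anagramCount word → Spec_anagramCount word (anagramCount word)

-- ===== LEMMAS AND PROOFS =====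

lemma calcFactorialLoop_natCast (n : Nat) (acc : Int) :
    calcFactorialLoop (n : Int) acc = acc * (n.factorial : Int) := by
  induction n generalizing acc with
  | zero => rw [calcFactorialLoop]; simp
  | succ m ih =>
      rw [calcFactorialLoop]
      have h : (0 : Int) < ((m + 1 : Nat) : Int) := by exact_mod_cast Nat.succ_pos m
      have h2 : ((m + 1 : Nat) : Int) - 1 = (m : Int) := by push_cast; ring
      rw [if_pos h, h2, ih]
      push_cast [Nat.factorial_succ]
      ring

lemma calcFactorial_natCast (n : Nat) : calcFactorial (n : Int) = (n.factorial : Int) := by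
  rw [calcFactorial, calcFactorialLoop_natCast]; ring

lemma binom_loop (n k : Nat) (hk : k ≤ n) :
    ∀ j, j ≤ k →
      (PySem.List.pyRange 1 ((j : Int) + 1)).foldl
        (fun b i => PySem.Int.floordiv (b * ((n : Int) - (k : Int) + i)) i) 1
      = ((n - k + j).choose j : Int) := by
  intro j
  induction j with
  | zero => intro _; norm_num [PySem.List.pyRange]
  | succ m ih =>
      intro hm
      have hr : PySem.List.pyRange 1 ((m : Int) + 1 + 1)
          = PySem.List.pyRange 1 ((m : Int) + 1) ++ [(m : Int) + 1] :=
        PySem.List.pyRange_one_succ_right (by omega)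
      have hcast : ((m + 1 : Nat) : Int) + 1 = (m : Int) + 1 + 1 := by push_cast; ring
      rw [hcast, hr, List.foldl_append, ih (by omega)]
      have hnum : ((n : Int) - (k : Int) + ((m : Int) + 1)) = ((n - k + m + 1 : Nat) : Int) := by
        have : k ≤ n := hk; push_cast [Nat.sub_add_cancel]; omega
      simp only [List.foldl_cons, List.foldl_nil]
      rw [hnum]
      have hmul : ((n - k + m).choose m : Int) * ((n - k + m + 1 : Nat) : Int)
          = (((n - k + m + 1).choose (m + 1) * (m + 1) : Nat) : Int) := by
        push_cast
        have := Nat.add_one_mul_choose_eq (n - k + m) m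
        push_cast at this
        linarith [this]
      rw [hmul]
      have hone : ((m : Int) + 1) = ((m + 1 : Nat) : Int) := by push_cast; ring
      rw [hone, PySem.Int.floordiv_natCast]
      rw [Nat.mul_div_cancel _ (Nat.succ_pos m)]
      norm_cast

lemma binomHelper_natCast (n k : Nat) (hk : k ≤ n) :
    binomHelper (n : Int) (k : Int) = (n.choose k : Int) := by
  rw [binomHelper]
  have := binom_loop n k hk k le_rfl
  rw [this, Nat.sub_add_cancel hk]

-- A's division loop over the distinct keys, at the Nat level
lemma foldA (S : List Char) (l : List Char) (N : Nat) :
    S.foldl (fun (c : Int) k => PySem.Int.floordiv c (calcFactorial ((l.count k : Nat) : Int))) (N : Int)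
      = ((N / ((S.map (fun k => l.count k)).map Nat.factorial).prod : Nat) : Int) := by
  induction S generalizing N with
  | nil => simp
  | cons k S ih =>
      simp only [List.foldl_cons, List.map_cons, List.prod_cons]
      rw [calcFactorial_natCast, PySem.Int.floordiv_natCast, ih,
        Nat.div_div_eq_div_mul]

-- B's accumulating loop, at the Nat level
def natFold (vs : List Nat) (t r : Nat) : Nat × Nat :=
  vs.foldl (fun p v => (p.1 + v, p.2 * Nat.choose (p.1 + v) v)) (t, r)

lemma foldB_cast (vs : List Nat) (t r : Nat) :
    (vs.map (fun (v : Nat) => (v : Int))).foldl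
        (fun (tr : Int × Int) (c : Int) => (tr.1 + c, tr.2 * binomHelper (tr.1 + c) c))
        ((t : Int), (r : Int))
      = (((natFold vs t r).1 : Int), ((natFold vs t r).2 : Int)) := by
  induction vs generalizing t r with
  | nil => simp [natFold]
  | cons v vs ih =>
      simp only [List.map_cons, List.foldl_cons, natFold]
      have h1 : (t : Int) + (v : Int) = ((t + v : Nat) : Int) := by push_cast; ring
      rw [h1, binomHelper_natCast (t + v) v (by omega)]
      have h2 : (r : Int) * ((t + v).choose v : Int) = ((r * (t + v).choose v : Nat) : Int) := by
        push_cast; ring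
      rw [h2]
      exact ih (t + v) (r * (t + v).choose v)

lemma natFold_spec (vs : List Nat) (t r : Nat) :
    (natFold vs t r).2 * (vs.map Nat.factorial).prod * t.factorial
      = r * (t + vs.sum).factorial := by
  induction vs generalizing t r with
  | nil => simp [natFold]
  | cons v vs ih =>
      simp only [natFold, List.foldl_cons, List.map_cons, List.prod_cons, List.sum_cons]
      have ih' := ih (t + v) (r * (t + v).choose v)
      rw [natFold] at ih'
      set X := ((vs.foldl (fun p v => (p.1 + v, p.2 * Nat.choose (p.1 + v) v))
        (t + v, r * (t + v).choose v)).2) with hX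
      have hfac : (t + v).choose v * v.factorial * t.factorial = (t + v).factorial := by
        have := Nat.choose_mul_factorial_mul_factorial (show v ≤ t + v by omega)
        simpa [Nat.add_sub_cancel_left, Nat.add_comm t v] using this
      have hpos : 0 < (t + v).factorial := Nat.factorial_pos _
      apply Nat.eq_of_mul_eq_mul_right hpos
      calc X * (v.factorial * (vs.map Nat.factorial).prod) * t.factorial * (t + v).factorial
          = (X * (vs.map Nat.factorial).prod * (t + v).factorial)
              * (v.factorial * t.factorial) := by ring
        _ = (r * (t + v).choose v * (t + v + vs.sum).factorial)
              * (v.factorial * t.factorial) := by rw [ih']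
        _ = r * (t + v + vs.sum).factorial
              * ((t + v).choose v * v.factorial * t.factorial) := by ring
        _ = r * (t + (v + vs.sum)).factorial * (t + v).factorial := by
              rw [hfac]; ring_nf

lemma counter_sum_counts (l : List Char) :
    ((PySem.Set.ofList l).map (fun k => l.count k)).sum = l.length := by
  have hperm : l.dedup.Perm (PySem.Set.ofList l) :=
    (List.perm_ext_iff_of_nodup l.nodup_dedup (PySem.Set.nodup_ofList l)).mpr
      (fun a => by rw [List.mem_dedup, PySem.Set.mem_ofList])
  calc ((PySem.Set.ofList l).map (fun k => l.count k)).sum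
      = (l.dedup.map (fun k => l.count k)).sum := ((hperm.map _).sum_eq).symm
    _ = l.length := List.sum_map_count_dedup_eq_length l

lemma dict_step_eq :
    (fun (d : PySem.Dict Char Int) char =>
        if d.contains char then d.insert char (d.getD char 0 + 1) else d.insert char 1)
      = fun (d : PySem.Dict Char Int) ch => d.insert ch (d.getD ch 0 + 1) := by
  funext d c
  split_ifs with h
  · rfl
  · have h0 : d.getD c 0 = 0 := PySem.Dict.getD_of_not_contains d 0 (by simpa using h)
    rw [h0]; norm_num

theorem anagramCount_eq (word : String) : anagramCount word = anagramCount_alt word := by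
  unfold anagramCount anagramCount_alt
  rw [dict_step_eq, PySem.Dict.foldl_insert_getD_add_one_eq_counter]
  set l := (PySem.Str.lower word).toList with hl
  set S := PySem.Set.ofList l with hS
  set n := word.toList.length with hn
  have hitems : (PySem.Dict.counter l).items
      = S.map (fun k => (k, ((l.count k : Nat) : Int))) := PySem.Dict.items_counter l
  -- A's side: n! successively floor-divided by the count factorials
  have hA : (PySem.Dict.counter l).items.foldl
        (fun count kv => PySem.Int.floordiv count (calcFactorial kv.2))
        (calcFactorial (PySem.Str.len word))
      = ((n.factorial / ((S.map (fun k => l.count k)).map Nat.factorial).prod : Nat) : Int) := by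
    rw [hitems, PySem.Str.len_eq, ← hn, calcFactorial_natCast, List.foldl_map]
    exact foldA S l n.factorial
  -- B's side: the running-total binomial product
  have hvals : (PySem.Dict.counter l).values
      = (S.map (fun k => l.count k)).map (fun (v : Nat) => (v : Int)) := by
    show (PySem.Dict.counter l).items.map (·.2) = _
    rw [hitems, List.map_map, List.map_map]
    rfl
  have hB : ((PySem.Dict.counter l).values.foldl
        (fun (tr : Int × Int) c => (tr.1 + c, tr.2 * binomHelper (tr.1 + c) c))
        (0, 1)).2
      = ((natFold (S.map (fun k => l.count k)) 0 1).2 : Int) := by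
    rw [hvals]
    have h01 : ((0 : Int), (1 : Int)) = (((0 : Nat) : Int), ((1 : Nat) : Int)) := by norm_num
    rw [h01, foldB_cast]
  rw [hA, hB]
  -- the counts sum to n, so B's accumulator ends at exactly A's quotient
  have hlen : l.length = n := by
    rw [hl, PySem.Str.toList_lower, hn, PySem.Chars.lower, List.length_map]
  have hsum : (S.map (fun k => l.count k)).sum = n := by
    rw [hS, counter_sum_counts, hlen]
  have hspec := natFold_spec (S.map (fun k => l.count k)) 0 1
  rw [Nat.factorial_zero, mul_one, one_mul, Nat.zero_add, hsum] at hspec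
  have hpos : 0 < ((S.map (fun k => l.count k)).map Nat.factorial).prod :=
    List.prod_pos (by intro x hx; simp only [List.mem_map] at hx
                      obtain ⟨v, _, rfl⟩ := hx; exact Nat.factorial_pos v)
  rw [Nat.div_eq_of_eq_mul_left hpos hspec.symm]

-- ===== VERDICT (by name: the statement is the Claim_ definition above) =====
theorem anagramCount_spec : Claim_equal_anagramCount := by
  intro word _
  unfold Spec_anagramCount
  exact anagramCount_eq word
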